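-- pv_equiv track=rewrite | github.com/aktivx/CS106A-Python | S6-tweets.py | add_tweet
-- ===== SOURCE A (Python) =====
-- def add_tweet(user_tags, tweet):
--     """
--     Given a user_tags dict and a tweet, parse out the user and tags,
--     and add those counts to the user_tags dict which is returned.
--     If no user exists in the tweet, return the user_tags dict unchanged.
--     Note: call the parse_tags(tweet) and parse_user(tweet) functions to pull
--     the parts out of the tweet.
--     >>> add_tweet({}, '@alice: #apple #banana')
--     {'@alice': {'#apple': 1, '#banana': 1}}
--     >>> add_tweet({'@alice': {'#apple': 1, '#banana': 1}}, '@alice: #banana')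
--     {'@alice': {'#apple': 1, '#banana': 2}}
--     >>> add_tweet({'@alice': {'#apple': 1, '#banana': 2}}, '@bob: #apple')
--     {'@alice': {'#apple': 1, '#banana': 2}, '@bob': {'#apple': 1}}
--     """
--     tags_list = tweet.split(' ')
--     user= tags_list[0].strip(':')
--     tags_list.pop(0)
--     tags_dict = {}
--     for tag in tags_list:
--         if tag not in tags_dict:
--             tags_dict[tag] = 1
--         else:
--             tags_dict[tag] += 1
--     if user not in user_tags:
--         # if tags_dict != {}:
--         user_tags[user] = tags_dict
--     else:
--         user_current_tags = user_tags[user]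
--         for tag in tags_dict:
--             if tag not in user_current_tags:
--                 user_current_tags[tag] = tags_dict[tag]
--             else:
--                 user_current_tags[tag] += tags_dict[tag]
--
--         user_tags[user] = user_current_tags
--
--     return user_tags
-- ===== SOURCE B (Python) =====
-- def add_tweet(user_tags, tweet):
--     # One pass: fetch/create the user's tag dict once, count tokens directly into it.
--     tokens = tweet.split(' ')
--     target = user_tags.setdefault(tokens[0].strip(':'), {})
--     for tag in tokens[1:]:
--         target[tag] = target.get(tag, 0) + 1
--     return user_tags
-- ===== Notes on version B (the rewrite author's own statement) =====
-- stated objective: simpler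
-- what changed: B fuses A's two passes (build an intermediate tags_dict, then merge it key-by-key into the user's entry) into a single loop that counts the tokens directly into the user's sub-dict obtained once via setdefault, eliminating the intermediate dict entirely.
import Mathlib
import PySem

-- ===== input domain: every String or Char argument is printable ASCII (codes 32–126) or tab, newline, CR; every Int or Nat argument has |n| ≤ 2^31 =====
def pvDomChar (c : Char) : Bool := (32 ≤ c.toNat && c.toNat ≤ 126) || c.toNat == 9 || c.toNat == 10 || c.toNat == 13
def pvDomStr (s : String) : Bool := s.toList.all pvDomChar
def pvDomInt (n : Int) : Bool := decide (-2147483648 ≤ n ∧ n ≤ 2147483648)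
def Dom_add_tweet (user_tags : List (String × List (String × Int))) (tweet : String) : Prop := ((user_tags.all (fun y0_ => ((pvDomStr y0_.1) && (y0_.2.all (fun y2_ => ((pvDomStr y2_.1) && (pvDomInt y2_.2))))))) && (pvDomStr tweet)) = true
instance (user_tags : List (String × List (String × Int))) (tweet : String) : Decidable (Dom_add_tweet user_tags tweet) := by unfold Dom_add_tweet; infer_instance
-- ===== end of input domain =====

-- B fuses A's two passes (count into a fresh tags_dict, then merge it in) into one loop counting
-- straight into the user's sub-dict obtained once via setdefault (objective: simpler).
-- Both A and B mutate user_tags in place in Python (the same mutation); the equivalence proved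
-- here is about the return value.

-- ===== PORT A =====
def add_tweet (user_tags : List (String × List (String × Int))) (tweet : String) : List (String × List (String × Int)) :=
  let tags_list := (PySem.Str.split? tweet " ").getD []   -- tweet.split(' '); sep " " ≠ "" so split? is always some (getD is a totality guard only)
  let user := PySem.Str.stripChars (List.headD tags_list "") ":"  -- tags_list[0].strip(':'); index 0 never raises (split is nonempty)
  let rest := List.tail tags_list                         -- tags_list.pop(0): the remaining list
  let tags_dict : PySem.Dict String Int :=
    rest.foldl (fun d tag =>
      if d.contains tag = false then d.insert tag 1 else d.modify tag 0 (· + 1)) PySem.Dict.empty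
  let ud : PySem.Dict String (PySem.Dict String Int) :=
    PySem.Dict.mk (user_tags.map (fun p => (p.1, PySem.Dict.mk p.2)))
  let ud' :=
    if ud.contains user = false then ud.insert user tags_dict
    else
      let cur := ud.getD user PySem.Dict.empty
      let cur' := tags_dict.items.foldl (fun c kv =>
        if c.contains kv.1 = false then c.insert kv.1 kv.2 else c.modify kv.1 0 (· + kv.2)) cur
      ud.insert user cur'
  ud'.items.map (fun p => (p.1, p.2.items))

-- ===== PORT B =====
def add_tweet_alt (user_tags : List (String × List (String × Int))) (tweet : String) : List (String × List (String × Int)) :=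
  let tokens := (PySem.Str.split? tweet " ").getD []      -- tweet.split(' '); sep " " ≠ "" so split? is always some
  let user := PySem.Str.stripChars (List.headD tokens "") ":"
  let ud : PySem.Dict String (PySem.Dict String Int) :=
    PySem.Dict.mk (user_tags.map (fun p => (p.1, PySem.Dict.mk p.2)))
  let ud1 := ud.setdefault user PySem.Dict.empty          -- target = user_tags.setdefault(user, {})
  -- target aliases ud1[user]; each 'target[tag] = target.get(tag, 0) + 1' writes through the alias:
  let ud2 := (List.tail tokens).foldl (fun d tag =>
    d.modify user PySem.Dict.empty (fun t => t.insert tag (t.getD tag 0 + 1))) ud1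
  ud2.items.map (fun p => (p.1, p.2.items))

-- ===== PRECONDITION & SPEC =====
-- Pre_ excludes association lists with a duplicated key (outer or inner): such lists represent
-- no Python dict (dict keys are unique), so neither program's behaviour there is specified.
def Pre_add_tweet (user_tags : List (String × List (String × Int))) (tweet : String) : Prop :=
  (user_tags.map (·.1)).Nodup ∧ ∀ p ∈ user_tags, (p.2.map (·.1)).Nodup
instance (user_tags : List (String × List (String × Int))) (tweet : String) : Decidable (Pre_add_tweet user_tags tweet) := by unfold Pre_add_tweet; infer_instance
def pvWitness_add_tweet : (List (String × List (String × Int))) × String :=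
  ([("@alice", [("#apple", 1), ("#banana", 2)])], "@alice: #banana")

def Spec_add_tweet (user_tags : List (String × List (String × Int))) (tweet : String) (out : List (String × List (String × Int))) : Prop := out = add_tweet_alt user_tags tweet
instance (user_tags : List (String × List (String × Int))) (tweet : String) (out : List (String × List (String × Int))) : Decidable (Spec_add_tweet user_tags tweet out) := by unfold Spec_add_tweet; infer_instance

-- ===== CLAIM (what is proved, stated in full; the proofs are below) =====
def Claim_equal_add_tweet : Prop := ∀ (user_tags : List (String × List (String × Int))) (tweet : String), Dom_add_tweet user_tags tweet → Pre_add_tweet user_tags tweet → Spec_add_tweet user_tags tweet (add_tweet user_tags tweet)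

-- ===== LEMMAS AND PROOFS =====

-- A's counting step is exactly a modify-by-+1 (on a missing key, modify inserts 0+1 = 1).
theorem pv_stepA_eq (d : PySem.Dict String Int) (t : String) :
    (if d.contains t = false then d.insert t 1 else d.modify t 0 (· + 1)) = d.modify t 0 (· + 1) := by
  by_cases h : d.contains t = false
  · simp [h, PySem.Dict.modify, PySem.Dict.getD_of_not_contains _ _ h]
  · simp [h]

-- A's merging step is exactly a modify-by-+kv.2.
theorem pv_stepM_eq (c : PySem.Dict String Int) (kv : String × Int) :
    (if c.contains kv.1 = false then c.insert kv.1 kv.2 else c.modify kv.1 0 (· + kv.2)) = c.modify kv.1 0 (· + kv.2) := by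
  by_cases h : c.contains kv.1 = false
  · simp [h, PySem.Dict.modify, PySem.Dict.getD_of_not_contains _ _ h]
  · simp [h]

-- getD after folding additive modifies over a list of (key, increment) pairs.
theorem pv_getD_pairfold (ps : List (String × Int)) (c : PySem.Dict String Int) (v : String) :
    (ps.foldl (fun c kv => c.modify kv.1 0 (· + kv.2)) c).getD v 0
      = c.getD v 0 + ((ps.filter (fun kv => kv.1 == v)).map (·.2)).sum := by
  induction ps generalizing c with
  | nil => simp
  | cons kv t ih =>
    rw [List.foldl_cons, ih]
    by_cases h : kv.1 = v
    · subst h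
      rw [PySem.Dict.getD_modify_self]
      simp
      ring
    · rw [PySem.Dict.getD_modify]
      simp [Ne.symm h, h]

-- Filtering a duplicate-free list for one value.
theorem pv_filter_nodup (s : List String) (hs : s.Nodup) (v : String) :
    s.filter (fun k => k == v) = if v ∈ s then [v] else [] := by
  induction s with
  | nil => simp
  | cons x t ih =>
    rcases List.nodup_cons.mp hs with ⟨hx, ht⟩
    by_cases h : x = v
    · subst h
      simp [ih ht, hx]
    · simp [h, ih ht, Ne.symm h]

-- Updating a set with the dedup of l is updating it with l.
theorem pv_update_ofList (l : List String) (s : PySem.Set String) :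
    PySem.Set.update s (PySem.Set.ofList l) = PySem.Set.update s l := by
  induction l using List.reverseRecOn generalizing s with
  | nil => rfl
  | append_singleton t x ih =>
    have h1 : PySem.Set.ofList (t ++ [x]) = PySem.Set.add (PySem.Set.ofList t) x := by
      simp [PySem.Set.ofList, List.foldl_append]
    have h2 : ∀ (u : PySem.Set String) (m : List String), PySem.Set.update u (m ++ [x]) = PySem.Set.add (PySem.Set.update u m) x := by
      intro u m; simp [PySem.Set.update, List.foldl_append]
    rw [h1, h2, ← ih]
    by_cases hx : x ∈ PySem.Set.ofList t
    · have hu : (PySem.Set.add (PySem.Set.ofList t) x) = PySem.Set.ofList t := by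
        simp [PySem.Set.add, hx]
      have hm : x ∈ PySem.Set.update s (PySem.Set.ofList t) := by
        rw [PySem.Set.mem_update]; right; exact hx
      have hadd : PySem.Set.add (PySem.Set.update s (PySem.Set.ofList t)) x = PySem.Set.update s (PySem.Set.ofList t) := by
        simp [PySem.Set.add, hm]
      rw [hu, hadd]
    · have hu : (PySem.Set.add (PySem.Set.ofList t) x) = PySem.Set.ofList t ++ [x] := by
        simp [PySem.Set.add, hx]
      rw [hu, h2]

-- Re-inserting the looked-up value is a no-op (unique keys).
theorem pv_insert_getD_self {ν : Type} (d : PySem.Dict String ν) (k : String) (dflt : ν)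
    (hc : d.contains k = true) (hnd : d.keys.Nodup) : d.insert k (d.getD k dflt) = d := by
  apply PySem.Dict.ext
  rw [PySem.Dict.items_insert_of_contains _ _ hc]
  conv_rhs => rw [← List.map_id d.items]
  apply List.map_congr_left
  intro p hp
  by_cases h : p.1 = k
  · have hmem : (k, p.2) ∈ d.items := by rw [← h]; exact hp
    have hg' := PySem.Dict.get?_of_mem_items d hmem hnd
    have hg : d.getD k dflt = p.2 := by rw [PySem.Dict.getD, hg']; rfl
    rw [if_pos (by simp [h]), hg, ← h]
    rfl
  · simp [h]

-- Merging the tag counter of l into cur = counting l straight into cur.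
theorem pv_merge_eq_count (l : List String) (cur : PySem.Dict String Int) (hnd : cur.keys.Nodup) :
    (PySem.Dict.counter l).items.foldl (fun c kv => c.modify kv.1 0 (· + kv.2)) cur
      = l.foldl (fun c t => c.modify t 0 (· + 1)) cur := by
  have hkX := PySem.Dict.keys_foldl_modify_key (PySem.Dict.counter l).items Prod.fst 0
      (fun _ kv => (· + kv.2)) cur
  have hkY := PySem.Dict.keys_foldl_modify_key l (fun t => t) 0 (fun _ _ => (· + 1)) cur
  have hnX := PySem.Dict.nodup_keys_foldl_modify_key (PySem.Dict.counter l).items Prod.fst 0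
      (fun _ kv => (· + kv.2)) cur hnd
  have hnY := PySem.Dict.nodup_keys_foldl_modify_key l (fun t => t) 0 (fun _ _ => (· + 1)) cur hnd
  have hkeys : ((PySem.Dict.counter l).items.foldl (fun c kv => c.modify kv.1 0 (· + kv.2)) cur).keys
      = (l.foldl (fun c t => c.modify t 0 (· + 1)) cur).keys := by
    rw [hkX, hkY]
    have hk : (PySem.Dict.counter l).items.map Prod.fst = (PySem.Dict.counter l).keys := rfl
    rw [hk, PySem.Dict.keys_counter, pv_update_ofList]
    simp
  have hgetD : ∀ v, ((PySem.Dict.counter l).items.foldl (fun c kv => c.modify kv.1 0 (· + kv.2)) cur).getD v 0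
      = (l.foldl (fun c t => c.modify t 0 (· + 1)) cur).getD v 0 := by
    intro v
    rw [pv_getD_pairfold, PySem.Dict.getD_foldl_modify_add_one, PySem.Dict.items_counter]
    congr 1
    rw [List.filter_map]
    have hcomp : ((fun kv : String × Int => kv.1 == v) ∘ (fun k => (k, (List.count k l : Int)))) = (fun k => k == v) := rfl
    rw [hcomp, pv_filter_nodup _ (PySem.Set.nodup_ofList l) v]
    by_cases hv : v ∈ l
    · simp [PySem.Set.mem_ofList, hv]
    · simp [PySem.Set.mem_ofList, hv, List.count_eq_zero.mpr hv]
  apply PySem.Dict.ext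
  rw [PySem.Dict.items_eq_map_keys _ hnX 0, PySem.Dict.items_eq_map_keys _ hnY 0, hkeys]
  exact List.map_congr_left (fun k _ => by rw [hgetD k])

-- B's outer loop (writes through the alias) = one insert of the inner count fold.
theorem pv_outer_fold (l : List String) (d : PySem.Dict String (PySem.Dict String Int)) (k : String)
    (hc : d.contains k = true) (hnd : d.keys.Nodup) :
    l.foldl (fun d tag => d.modify k PySem.Dict.empty (fun t => t.insert tag (t.getD tag 0 + 1))) d
      = d.insert k (l.foldl (fun t tag => t.modify tag 0 (· + 1)) (d.getD k PySem.Dict.empty)) := by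
  induction l generalizing d with
  | nil => exact (pv_insert_getD_self d k _ hc hnd).symm
  | cons x t ih =>
    rw [List.foldl_cons, List.foldl_cons]
    have hc' : (d.modify k PySem.Dict.empty (fun t => t.insert x (t.getD x 0 + 1))).contains k = true := by
      rw [PySem.Dict.contains_modify]; simp
    have hnd' : (d.modify k PySem.Dict.empty (fun t => t.insert x (t.getD x 0 + 1))).keys.Nodup := by
      show (d.insert k _).keys.Nodup
      exact PySem.Dict.nodup_keys_insert _ _ _ hnd
    rw [ih _ hc' hnd', PySem.Dict.getD_modify_self]
    show (d.insert k _).insert k _ = _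
    rw [PySem.Dict.insert_insert_self]
    rfl

-- The whole comparison at the dict level, for any token list and user.
theorem pv_dict_eq (ud : PySem.Dict String (PySem.Dict String Int)) (user : String) (l : List String)
    (hnd : ud.keys.Nodup) (hin : ∀ p ∈ ud.items, p.2.keys.Nodup) :
    (if ud.contains user = false then
       ud.insert user (l.foldl (fun d tag =>
         if d.contains tag = false then d.insert tag 1 else d.modify tag 0 (· + 1)) PySem.Dict.empty)
     else
       ud.insert user ((l.foldl (fun d tag =>
         if d.contains tag = false then d.insert tag 1 else d.modify tag 0 (· + 1)) PySem.Dict.empty).items.foldl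
           (fun c kv => if c.contains kv.1 = false then c.insert kv.1 kv.2 else c.modify kv.1 0 (· + kv.2))
           (ud.getD user PySem.Dict.empty)))
    = l.foldl (fun d tag =>
        d.modify user PySem.Dict.empty (fun t => t.insert tag (t.getD tag 0 + 1)))
        (ud.setdefault user PySem.Dict.empty) := by
  have hcnt : l.foldl (fun d tag =>
      if d.contains tag = false then d.insert tag 1 else d.modify tag 0 (· + 1)) PySem.Dict.empty
      = PySem.Dict.counter l := by
    simp only [pv_stepA_eq]; rfl
  by_cases hc : ud.contains user = false
  · rw [if_pos hc, PySem.Dict.setdefault_of_not_contains _ _ hc,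
       pv_outer_fold l _ user (PySem.Dict.contains_insert_self _ _ _) (PySem.Dict.nodup_keys_insert _ _ _ hnd),
       PySem.Dict.getD_insert_self, PySem.Dict.insert_insert_self, hcnt]
    rfl
  · rw [if_neg hc]
    have hc' : ud.contains user = true := by
      cases h : ud.contains user with
      | false => exact absurd h hc
      | true => rfl
    have hcur : (ud.getD user PySem.Dict.empty).keys.Nodup := by
      cases hq : ud.get? user with
      | none => rw [PySem.Dict.getD, hq]; simp [PySem.Dict.keys, PySem.Dict.empty]
      | some v =>
        have hmem := PySem.Dict.mem_items_of_get?_eq_some ud hq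
        rw [PySem.Dict.getD, hq]
        exact hin (user, v) hmem
    rw [PySem.Dict.setdefault_of_contains _ _ hc', pv_outer_fold l ud user hc' hnd, hcnt]
    congr 1
    rw [show ((PySem.Dict.counter l).items.foldl
        (fun c kv => if c.contains kv.1 = false then c.insert kv.1 kv.2 else c.modify kv.1 0 (· + kv.2))
        (ud.getD user PySem.Dict.empty))
      = ((PySem.Dict.counter l).items.foldl (fun c kv => c.modify kv.1 0 (· + kv.2))
        (ud.getD user PySem.Dict.empty)) from by simp only [pv_stepM_eq]]
    exact pv_merge_eq_count l _ hcur

-- ===== VERDICT (by name: the statement is the Claim_ definition above) =====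
theorem add_tweet_spec : Claim_equal_add_tweet := by
  intro user_tags tweet _hdom hpre
  obtain ⟨hout, hin⟩ := hpre
  unfold Spec_add_tweet add_tweet add_tweet_alt
  simp only
  apply congrArg (List.map _)
  apply congrArg PySem.Dict.items
  apply pv_dict_eq
  · show (List.map Prod.fst (user_tags.map (fun p => (p.1, PySem.Dict.mk p.2)))).Nodup
    simpa [List.map_map, Function.comp_def] using hout
  · intro p hp
    rcases List.mem_map.mp hp with ⟨q, hq, rfl⟩
    show (List.map Prod.fst (PySem.Dict.mk q.2).items).Nodup
    simpa using hin q hq
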